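-- pv_equiv track=rewrite | github.com/anthoxo/python-skeleton | q2.py | question02
-- ===== SOURCE A (Python) =====
-- def question02(cashFlowIn, cashFlowOut):
--   # modify and then return the variable below
--   answer = 1000
--   if (len(cashFlowIn) > 10 and len(cashFlowOut) > 10):
--     return 0
--   else:
--     cashFlowIn = sorted(cashFlowIn, reverse=True)
--     cashFlowOut = sorted(cashFlowOut, reverse=True)
--     maxList = cashFlowIn if (len(cashFlowIn) > len(cashFlowOut)) else cashFlowOut
--     minList = cashFlowIn if (maxList == cashFlowOut) else cashFlowOut
--     for i in range(len(minList)):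
--       tmp1 = minList[i:]
--       tmp2 = maxList
--       j = i
--       sumList1, sumList2 = [tmp1[0]], [tmp2[0]]
--       tmp1 = tmp1[1:]
--       tmp2 = tmp2[1:]
--       t = True
--       while(tmp1 != [] and tmp2 != []):
--         s1,s2 = sum(sumList1), sum(sumList2)
--         if (s1 > s2):
--           if (s1-s2 in tmp2):
--             return 0
--           else:
--             sumList2 += [tmp2[0]]
--             answer = min(answer, abs(s1-s2-tmp2[0]))
--             tmp2 = tmp2[1:]
--         elif (s1 < s2):
--           if (s2-s1 in tmp1):
--             return 0
--           else:
--             sumList1 += [tmp1[0]]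
--             answer = min(answer, abs(s2-s1-tmp1[0]))
--             tmp1 = tmp1[1:]
--         else:
--           return 0
--   return answer
-- ===== SOURCE B (Python) =====
-- def question02(cashFlowIn, cashFlowOut):
--     # Same search, but with running sums and per-value count dictionaries
--     # instead of re-summing growing lists and scanning slices each step.
--     if len(cashFlowIn) > 10 and len(cashFlowOut) > 10:
--         return 0
--     a = sorted(cashFlowIn, reverse=True)
--     b = sorted(cashFlowOut, reverse=True)
--     if len(a) > len(b):
--         mn, mx = b, a
--     else:
--         mn, mx = a, b
--     answer = 1000
--     for i in range(len(mn)):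
--         c1 = {}
--         for v in mn[i + 1:]:
--             c1[v] = c1.get(v, 0) + 1
--         c2 = {}
--         for v in mx[1:]:
--             c2[v] = c2.get(v, 0) + 1
--         s1 = mn[i]
--         s2 = mx[0]
--         j1 = i + 1
--         j2 = 1
--         while j1 < len(mn) and j2 < len(mx):
--             if s1 > s2:
--                 d = s1 - s2
--                 if c2.get(d, 0) > 0:
--                     return 0
--                 v = mx[j2]
--                 c2[v] = c2.get(v, 0) - 1
--                 answer = min(answer, abs(d - v))
--                 s2 += v
--                 j2 += 1
--             elif s1 < s2:
--                 d = s2 - s1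
--                 if c1.get(d, 0) > 0:
--                     return 0
--                 v = mn[j1]
--                 c1[v] = c1.get(v, 0) - 1
--                 answer = min(answer, abs(d - v))
--                 s1 += v
--                 j1 += 1
--             else:
--                 return 0
--     return answer
-- ===== Notes on version B (the rewrite author's own statement) =====
-- stated objective: alternative
-- what changed: B replaces A's re-summing of the growing sumList1/sumList2 and membership scans over list slices by running integer sums, index pointers and per-value count dictionaries, removing the inner re-sum/scan passes.
import Mathlib
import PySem

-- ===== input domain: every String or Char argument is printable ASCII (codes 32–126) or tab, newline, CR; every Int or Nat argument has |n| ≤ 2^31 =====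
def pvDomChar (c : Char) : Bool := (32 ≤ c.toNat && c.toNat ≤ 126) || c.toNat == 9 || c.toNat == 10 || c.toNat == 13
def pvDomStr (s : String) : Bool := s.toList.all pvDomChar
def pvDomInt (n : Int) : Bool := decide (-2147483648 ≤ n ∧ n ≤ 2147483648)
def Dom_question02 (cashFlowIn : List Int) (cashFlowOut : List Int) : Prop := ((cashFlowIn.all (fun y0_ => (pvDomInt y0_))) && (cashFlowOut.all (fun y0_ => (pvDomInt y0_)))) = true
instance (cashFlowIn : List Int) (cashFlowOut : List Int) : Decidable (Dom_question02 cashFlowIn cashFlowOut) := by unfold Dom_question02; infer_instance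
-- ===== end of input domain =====

-- B replaces A's re-summing of growing lists and membership scans over slices by
-- running sums, index pointers and per-value count dictionaries (objective: an
-- alternative algorithm computing the same value).

-- ===== PORT A =====
-- the inner while loop of A; .inl 0 models the early 'return 0', .inr the updated
-- answer.  The fuel argument is only a structural termination guard: each iteration
-- consumes one element of tmp1 or tmp2, so fuel = |tmp1| + |tmp2| always suffices.
def loopA : Nat → List Int → List Int → List Int → List Int → Int → Int ⊕ Int
  | 0, _, _, _, _, ans => .inr ans
  | fuel + 1, sl1, sl2, h1 :: r1, h2 :: r2, ans =>
    let s1 := sl1.sum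
    let s2 := sl2.sum
    if s1 > s2 then
      if s1 - s2 ∈ h2 :: r2 then .inl 0
      else loopA fuel sl1 (sl2 ++ [h2]) (h1 :: r1) r2 (min ans |s1 - s2 - h2|)
    else if s1 < s2 then
      if s2 - s1 ∈ h1 :: r1 then .inl 0
      else loopA fuel (sl1 ++ [h1]) sl2 r1 (h2 :: r2) (min ans |s2 - s1 - h1|)
    else .inl 0
  | _, _, _, _, _, ans => .inr ans

-- the 'for i in range(len(minList))' loop of A; fuel = number of remaining indices.
-- tmp1[0], tmp2[0] ported as '.getD 0 0'; exact whenever the lists are nonempty,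
-- which holds inside question02 (mx is the longer list, so i < mn.length ≤ mx.length)
def outerA (mn mx : List Int) : Nat → Nat → Int → Int
  | 0, _, ans => ans
  | fuel + 1, i, ans =>
    if i < mn.length then
      match loopA (((mn.drop i).drop 1).length + (mx.drop 1).length)
          [(mn.drop i).getD 0 0] [mx.getD 0 0] ((mn.drop i).drop 1) (mx.drop 1) ans with
      | .inl v => v
      | .inr ans2 => outerA mn mx fuel (i + 1) ans2
    else ans

def question02 (cashFlowIn : List Int) (cashFlowOut : List Int) : Int :=
  if cashFlowIn.length > 10 ∧ cashFlowOut.length > 10 then 0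
  else
    let a := PySem.List.sorted cashFlowIn (fun x => x) true
    let b := PySem.List.sorted cashFlowOut (fun x => x) true
    let mx := if a.length > b.length then a else b
    let mn := if mx = b then a else b
    outerA mn mx mn.length 0 1000

-- ===== PORT B =====
-- B's inner while loop: running sums s1 s2, index pointers j1 j2, count dicts c1 c2.
-- fuel is only a structural termination guard (each step advances j1 or j2).
def loopB (mn mx : List Int) : Nat → Nat → Nat → Int → Int → PySem.Dict Int Int → PySem.Dict Int Int → Int → Int ⊕ Int
  | 0, _, _, _, _, _, _, ans => .inr ans
  | fuel + 1, j1, j2, s1, s2, c1, c2, ans =>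
    if j1 < mn.length ∧ j2 < mx.length then
      if s1 > s2 then
        -- d = s1 - s2; membership test via the count dict
        if c2.getD (s1 - s2) 0 > 0 then .inl 0
        else
          -- v = mx[j2]; '.getD' is exact here: the guard gives j2 < mx.length
          loopB mn mx fuel j1 (j2 + 1) s1 (s2 + mx.getD j2 0) c1
            (c2.insert (mx.getD j2 0) (c2.getD (mx.getD j2 0) 0 - 1))
            (min ans |s1 - s2 - mx.getD j2 0|)
      else if s1 < s2 then
        -- d = s2 - s1
        if c1.getD (s2 - s1) 0 > 0 then .inl 0
        else
          -- v = mn[j1]; '.getD' is exact here: the guard gives j1 < mn.length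
          loopB mn mx fuel (j1 + 1) j2 (s1 + mn.getD j1 0) s2
            (c1.insert (mn.getD j1 0) (c1.getD (mn.getD j1 0) 0 - 1)) c2
            (min ans |s2 - s1 - mn.getD j1 0|)
      else .inl 0
    else .inr ans

-- B's outer loop: builds the two count dictionaries for each start index i
def outerB (mn mx : List Int) : Nat → Nat → Int → Int
  | 0, _, ans => ans
  | fuel + 1, i, ans =>
    if i < mn.length then
      match loopB mn mx ((mn.length - (i + 1)) + (mx.length - 1)) (i + 1) 1
          (mn.getD i 0) (mx.getD 0 0)
          ((mn.drop (i + 1)).foldl (fun d v => d.insert v (d.getD v 0 + 1)) PySem.Dict.empty)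
          ((mx.drop 1).foldl (fun d v => d.insert v (d.getD v 0 + 1)) PySem.Dict.empty) ans with
      | .inl v => v
      | .inr ans2 => outerB mn mx fuel (i + 1) ans2
    else ans

def question02_alt (cashFlowIn : List Int) (cashFlowOut : List Int) : Int :=
  if cashFlowIn.length > 10 ∧ cashFlowOut.length > 10 then 0
  else
    let a := PySem.List.sorted cashFlowIn (fun x => x) true
    let b := PySem.List.sorted cashFlowOut (fun x => x) true
    let p := if a.length > b.length then (b, a) else (a, b)
    outerB p.1 p.2 p.1.length 0 1000

-- ===== PRECONDITION & SPEC =====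
def Spec_question02 (cashFlowIn : List Int) (cashFlowOut : List Int) (out : Int) : Prop := out = question02_alt cashFlowIn cashFlowOut
instance (cashFlowIn : List Int) (cashFlowOut : List Int) (out : Int) : Decidable (Spec_question02 cashFlowIn cashFlowOut out) := by unfold Spec_question02; infer_instance

-- ===== CLAIM (what is proved, stated in full; the proofs are below) =====
def Claim_equal_question02 : Prop := ∀ (cashFlowIn : List Int) (cashFlowOut : List Int), Dom_question02 cashFlowIn cashFlowOut → Spec_question02 cashFlowIn cashFlowOut (question02 cashFlowIn cashFlowOut)

-- ===== LEMMAS AND PROOFS =====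

lemma loopA_nil (fuel : Nat) (sl1 sl2 t1 t2 : List Int) (ans : Int) (h : t1 = [] ∨ t2 = []) :
    loopA fuel sl1 sl2 t1 t2 ans = .inr ans := by
  cases fuel <;> cases t1 <;> cases t2 <;> simp_all [loopA]

lemma loop_eq (mn mx : List Int) :
    ∀ (fuel : Nat) (j1 j2 : Nat) (sl1 sl2 : List Int) (c1 c2 : PySem.Dict Int Int) (ans : Int),
      (∀ x, c1.getD x 0 = ((mn.drop j1).count x : Int)) →
      (∀ x, c2.getD x 0 = ((mx.drop j2).count x : Int)) →
      loopA fuel sl1 sl2 (mn.drop j1) (mx.drop j2) ans = loopB mn mx fuel j1 j2 sl1.sum sl2.sum c1 c2 ans := by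
  intro fuel
  induction fuel with
  | zero =>
    intro j1 j2 sl1 sl2 c1 c2 ans hc1 hc2
    simp [loopA, loopB]
  | succ fuel ih =>
    intro j1 j2 sl1 sl2 c1 c2 ans hc1 hc2
    by_cases hlt : j1 < mn.length ∧ j2 < mx.length
    · obtain ⟨hj1, hj2⟩ := hlt
      have e1 : mn.drop j1 = mn[j1] :: mn.drop (j1 + 1) := List.drop_eq_getElem_cons hj1
      have e2 : mx.drop j2 = mx[j2] :: mx.drop (j2 + 1) := List.drop_eq_getElem_cons hj2
      have hg1 : mn.getD j1 0 = mn[j1] := List.getD_eq_getElem mn 0 hj1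
      have hg2 : mx.getD j2 0 = mx[j2] := List.getD_eq_getElem mx 0 hj2
      have hmem1 : ∀ y : Int, (y ∈ mn.drop j1) ↔ c1.getD y 0 > 0 := by
        intro y
        rw [hc1]
        constructor
        · intro hy; exact_mod_cast List.count_pos_iff.mpr hy
        · intro hy; exact List.count_pos_iff.mp (by exact_mod_cast hy)
      have hmem2 : ∀ y : Int, (y ∈ mx.drop j2) ↔ c2.getD y 0 > 0 := by
        intro y
        rw [hc2]
        constructor
        · intro hy; exact_mod_cast List.count_pos_iff.mpr hy
        · intro hy; exact List.count_pos_iff.mp (by exact_mod_cast hy)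
      rw [e1, e2, loopA, loopB]
      rw [if_pos (show j1 < mn.length ∧ j2 < mx.length from ⟨hj1, hj2⟩)]
      by_cases hgt : sl1.sum > sl2.sum
      · rw [if_pos hgt, if_pos hgt]
        by_cases hm : sl1.sum - sl2.sum ∈ mx[j2] :: mx.drop (j2 + 1)
        · rw [if_pos hm, if_pos ((hmem2 _).mp (e2 ▸ hm))]
        · rw [if_neg hm, if_neg (fun hc => hm (e2 ▸ (hmem2 _).mpr hc))]
          rw [hg2, ← e1]
          have hcnew : ∀ x, (c2.insert mx[j2] (c2.getD mx[j2] 0 - 1)).getD x 0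
              = ((mx.drop (j2 + 1)).count x : Int) := by
            intro x
            rw [PySem.Dict.getD_insert]
            by_cases hx : x = mx[j2]
            · rw [if_pos hx, hx, hc2, e2, List.count_cons_self]
              push_cast
              ring
            · rw [if_neg hx, hc2, e2, List.count_cons]
              simp [Ne.symm hx]
          have := ih j1 (j2 + 1) sl1 (sl2 ++ [mx[j2]]) c1
            (c2.insert mx[j2] (c2.getD mx[j2] 0 - 1)) (min ans |sl1.sum - sl2.sum - mx[j2]|)
            hc1 hcnew
          simpa using this
      · rw [if_neg hgt, if_neg hgt]
        by_cases hlt2 : sl1.sum < sl2.sum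
        · rw [if_pos hlt2, if_pos hlt2]
          by_cases hm : sl2.sum - sl1.sum ∈ mn[j1] :: mn.drop (j1 + 1)
          · rw [if_pos hm, if_pos ((hmem1 _).mp (e1 ▸ hm))]
          · rw [if_neg hm, if_neg (fun hc => hm (e1 ▸ (hmem1 _).mpr hc))]
            rw [hg1, ← e2]
            have hcnew : ∀ x, (c1.insert mn[j1] (c1.getD mn[j1] 0 - 1)).getD x 0
                = ((mn.drop (j1 + 1)).count x : Int) := by
              intro x
              rw [PySem.Dict.getD_insert]
              by_cases hx : x = mn[j1]
              · rw [if_pos hx, hx, hc1, e1, List.count_cons_self]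
                push_cast
                ring
              · rw [if_neg hx, hc1, e1, List.count_cons]
                simp [Ne.symm hx]
            have := ih (j1 + 1) j2 (sl1 ++ [mn[j1]]) sl2
              (c1.insert mn[j1] (c1.getD mn[j1] 0 - 1)) c2 (min ans |sl2.sum - sl1.sum - mn[j1]|)
              hcnew hc2
            simpa using this
        · rw [if_neg hlt2, if_neg hlt2]
    · have hnil : mn.drop j1 = [] ∨ mx.drop j2 = [] := by
        rcases Nat.lt_or_ge j1 mn.length with h | h
        · exact Or.inr (List.drop_eq_nil_of_le (by omega))
        · exact Or.inl (List.drop_eq_nil_of_le h)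
      rw [loopA_nil _ _ _ _ _ _ hnil, loopB, if_neg hlt]

lemma outer_eq (mn mx : List Int) (hlen : mn.length ≤ mx.length) :
    ∀ (fuel i : Nat) (ans : Int), outerA mn mx fuel i ans = outerB mn mx fuel i ans := by
  intro fuel
  induction fuel with
  | zero => intro i ans; rw [outerA, outerB]
  | succ fuel ih =>
    intro i ans
    by_cases hi : i < mn.length
    · have hmx0 : 0 < mx.length := by omega
      have e1 : mn.drop i = mn[i] :: mn.drop (i + 1) := List.drop_eq_getElem_cons hi
      have hA1 : (mn.drop i).getD 0 0 = mn[i] := by rw [e1]; rfl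
      have hA2 : (mn.drop i).drop 1 = mn.drop (i + 1) := by rw [e1]; rfl
      have hB1 : mn.getD i 0 = mn[i] := List.getD_eq_getElem mn 0 hi
      have hB2 : mx.getD 0 0 = mx[0] := List.getD_eq_getElem mx 0 hmx0
      have hfuel : (mn.drop (i + 1)).length + (mx.drop 1).length
          = (mn.length - (i + 1)) + (mx.length - 1) := by
        simp [List.length_drop]
      have hloop := loop_eq mn mx ((mn.length - (i + 1)) + (mx.length - 1)) (i + 1) 1
        [mn[i]] [mx[0]]
        ((mn.drop (i + 1)).foldl (fun d v => d.insert v (d.getD v 0 + 1)) PySem.Dict.empty)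
        ((mx.drop 1).foldl (fun d v => d.insert v (d.getD v 0 + 1)) PySem.Dict.empty)
        ans (fun x => by rw [PySem.Dict.getD_foldl_insert_add_one]; simp)
        (fun x => by rw [PySem.Dict.getD_foldl_insert_add_one]; simp)
      simp only [List.sum_cons, List.sum_nil, add_zero] at hloop
      rw [outerA, outerB, if_pos hi, if_pos hi, hA1, hA2, hB1, hB2, hfuel, hloop]
      cases loopB mn mx ((mn.length - (i + 1)) + (mx.length - 1)) (i + 1) 1 mn[i] mx[0]
          ((mn.drop (i + 1)).foldl (fun d v => d.insert v (d.getD v 0 + 1)) PySem.Dict.empty)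
          ((mx.drop 1).foldl (fun d v => d.insert v (d.getD v 0 + 1)) PySem.Dict.empty) ans with
      | inl v => rfl
      | inr ans2 => exact ih (i + 1) ans2
    · rw [outerA, outerB, if_neg hi, if_neg hi]

-- ===== VERDICT (by name: the statement is the Claim_ definition above) =====
theorem question02_spec : Claim_equal_question02 := by
  unfold Claim_equal_question02
  intro cin cout _
  unfold Spec_question02 question02 question02_alt
  by_cases hg : cin.length > 10 ∧ cout.length > 10
  · simp only [if_pos hg]
  · simp only [if_neg hg]
    by_cases hab : (PySem.List.sorted cin (fun x => x) true).length
        > (PySem.List.sorted cout (fun x => x) true).length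
    · rw [if_pos hab, if_pos hab]
      rw [if_neg (show ¬ _ = _ from fun hab2 => absurd (congrArg List.length hab2) (by omega))]
      exact outer_eq (PySem.List.sorted cout (fun x => x) true)
        (PySem.List.sorted cin (fun x => x) true) (by omega)
        (PySem.List.sorted cout (fun x => x) true).length 0 1000
    · rw [if_neg hab, if_neg hab]
      rw [if_pos rfl]
      exact outer_eq (PySem.List.sorted cin (fun x => x) true)
        (PySem.List.sorted cout (fun x => x) true) (by omega)
        (PySem.List.sorted cin (fun x => x) true).length 0 1000
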